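-- pv_equiv track=rewrite | github.com/magnus-lindstrom/adventofcode | 2017/src/21.py | get_pattern_variations
-- ===== SOURCE A (Python) =====
-- def flatten_3d_pattern(pattern):
--     row = '/'.join(pattern)
--     return row
--
-- def make_pattern_3d(pattern):
--     rows = pattern.split('/')
--     return rows
--
-- def get_pattern_variations(pattern: str):
--     p3 = make_pattern_3d(pattern)
--     variations = []
--
--     if len(p3) == 2:
--         a = p3[0][0]
--         b = p3[0][1]
--         c = p3[1][0]
--         d = p3[1][1]
--         # n * 90deg rotation (n = 0,1,2,3)
--         variations.append([a + b, c + d])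
--         variations.append([c + a, d + b])
--         variations.append([d + c, b + a])
--         variations.append([b + d, a + c])
--
--         # flip + n * 90deg rotation (n = 0,1,2,3)
--         variations.append([b + a, d + c])
--         variations.append([d + b, c + a])
--         variations.append([c + d, a + b])
--         variations.append([a + c, b + d])
--
--     elif len(p3) == 3:
--         a = p3[0][0]
--         b = p3[0][1]
--         c = p3[0][2]
--         d = p3[1][0]
--         e = p3[1][1]
--         f = p3[1][2]
--         g = p3[2][0]
--         h = p3[2][1]
--         i = p3[2][2]
--
--         # n * 90deg rotation (n = 0,1,2,3)
--         variations.append([a+b+c, d+e+f, g+h+i])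
--         variations.append([g+d+a, h+e+b, i+f+c])
--         variations.append([i+h+g, f+e+d, c+b+a])
--         variations.append([c+f+i, b+e+h, a+d+g])
--
--         # flip + n * 90deg rotation (n = 0,1,2,3)
--         variations.append([c+b+a, f+e+d, i+h+g])
--         variations.append([i+f+c, h+e+b, g+d+a])
--         variations.append([g+h+i, d+e+f, a+b+c])
--         variations.append([a+d+g, b+e+h, c+f+i])
--
--     return [flatten_3d_pattern(e) for e in variations]
-- ===== SOURCE B (Python) =====
-- def get_pattern_variations(pattern: str):
--     rows = pattern.split('/')
--     n = len(rows)
--     if n not in (2, 3):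
--         return []
--     # parse into the n x n grid (indexing raises IndexError on short rows, as in A)
--     grid = [''.join(row[c] for c in range(n)) for row in rows]
--
--     def rot(g):  # clockwise rotation by coordinates
--         return [''.join(g[n - 1 - c][r] for c in range(n)) for r in range(n)]
--
--     def flip(g):  # mirror each row
--         return [''.join(g[r][n - 1 - c] for c in range(n)) for r in range(n)]
--
--     out = []
--     for g in (grid, flip(grid)):
--         for _ in range(4):
--             out.append('/'.join(g))
--             g = rot(g)
--     return out
-- ===== Notes on version B (the rewrite author's own statement) =====
-- stated objective: idiomatic
-- what changed: B replaces A's two hand-enumerated per-cell variation tables (8 literal grids over a..d / a..i) by a generic coordinate construction: parse the n x n grid, then emit grid + 3 clockwise rotations (new[r][c] = g[n-1-c][r]) for the grid and its row-mirrored flip.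
import Mathlib
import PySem

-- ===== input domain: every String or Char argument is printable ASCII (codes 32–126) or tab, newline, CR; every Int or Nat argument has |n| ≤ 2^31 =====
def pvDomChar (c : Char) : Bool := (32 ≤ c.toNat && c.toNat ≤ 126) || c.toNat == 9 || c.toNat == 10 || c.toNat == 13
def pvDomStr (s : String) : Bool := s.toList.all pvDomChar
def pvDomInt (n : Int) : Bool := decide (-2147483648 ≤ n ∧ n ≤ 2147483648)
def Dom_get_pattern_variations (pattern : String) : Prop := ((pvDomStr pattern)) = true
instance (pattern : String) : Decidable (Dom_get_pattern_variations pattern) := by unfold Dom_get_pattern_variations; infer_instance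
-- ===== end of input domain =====

-- B rebuilds the 8 variations generically (parse the n x n grid, rotate clockwise by coordinates, flip = mirror rows) instead of A's hand-enumerated per-cell tables; objective: idiomatic.

-- ===== PORT A =====
-- flatten_3d_pattern
def pvFlatten3d (rows : List String) : String := PySem.Str.join "/" rows

def get_pattern_variations (pattern : String) : List String :=
  -- make_pattern_3d: pattern.split('/')
  let p3 : List String := (PySem.Chars.splitOn pattern.toList ['/']).map String.ofList
  let variations : List (List String) :=
    match p3 with
    | [r0, r1] =>  -- len(p3) == 2
      match PySem.Str.pyGet? r0 0, PySem.Str.pyGet? r0 1,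
            PySem.Str.pyGet? r1 0, PySem.Str.pyGet? r1 1 with
      | some a, some b, some c, some d =>
        [ [String.ofList [a,b], String.ofList [c,d]],
          [String.ofList [c,a], String.ofList [d,b]],
          [String.ofList [d,c], String.ofList [b,a]],
          [String.ofList [b,d], String.ofList [a,c]],
          [String.ofList [b,a], String.ofList [d,c]],
          [String.ofList [d,b], String.ofList [c,a]],
          [String.ofList [c,d], String.ofList [a,b]],
          [String.ofList [a,c], String.ofList [b,d]] ]
      | _, _, _, _ => []   -- Python raises IndexError here (outside Pre_)
    | [r0, r1, r2] =>  -- len(p3) == 3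
      match PySem.Str.pyGet? r0 0, PySem.Str.pyGet? r0 1, PySem.Str.pyGet? r0 2,
            PySem.Str.pyGet? r1 0, PySem.Str.pyGet? r1 1, PySem.Str.pyGet? r1 2,
            PySem.Str.pyGet? r2 0, PySem.Str.pyGet? r2 1, PySem.Str.pyGet? r2 2 with
      | some a, some b, some c, some d, some e, some f, some g, some h, some i =>
        [ [String.ofList [a,b,c], String.ofList [d,e,f], String.ofList [g,h,i]],
          [String.ofList [g,d,a], String.ofList [h,e,b], String.ofList [i,f,c]],
          [String.ofList [i,h,g], String.ofList [f,e,d], String.ofList [c,b,a]],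
          [String.ofList [c,f,i], String.ofList [b,e,h], String.ofList [a,d,g]],
          [String.ofList [c,b,a], String.ofList [f,e,d], String.ofList [i,h,g]],
          [String.ofList [i,f,c], String.ofList [h,e,b], String.ofList [g,d,a]],
          [String.ofList [g,h,i], String.ofList [d,e,f], String.ofList [a,b,c]],
          [String.ofList [a,d,g], String.ofList [b,e,h], String.ofList [c,f,i]] ]
      | _, _, _, _, _, _, _, _, _ => []   -- Python raises IndexError here (outside Pre_)
    | _ => []
  variations.map (fun e => pvFlatten3d e)

-- ===== PORT B =====
-- rot(g) = [''.join(g[n-1-c][r] for c in range(n)) for r in range(n)]  (grid is always n x n here,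
-- so plain getD is exact for Python's indexing)
def pvRotB (n : Nat) (g : List (List Char)) : List (List Char) :=
  (List.range n).map (fun r => (List.range n).map (fun c => (g.getD (n-1-c) []).getD r ' '))

-- flip(g) = [''.join(g[r][n-1-c] for c in range(n)) for r in range(n)]
def pvFlipB (n : Nat) (g : List (List Char)) : List (List Char) :=
  (List.range n).map (fun r => (List.range n).map (fun c => (g.getD r []).getD (n-1-c) ' '))

-- inner loop: append '/'.join(g) then g = rot(g), four times
def pvFourRotsB (n : Nat) (g : List (List Char)) : List String :=
  ((List.range 4).foldl
    (fun st _ => (st.1 ++ [String.ofList (PySem.Chars.join ['/'] st.2)], pvRotB n st.2))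
    ([], g)).1

def get_pattern_variations_alt (pattern : String) : List String :=
  let rows := PySem.Chars.splitOn pattern.toList ['/']
  let n := rows.length
  if n = 2 ∨ n = 3 then
    -- grid = [''.join(row[c] for c in range(n)) for row in rows]; row[c] may raise IndexError
    match rows.mapM (fun r => (List.range n).mapM (fun c => r[c]?)) with
    | some grid => pvFourRotsB n grid ++ pvFourRotsB n (pvFlipB n grid)
    | none => []   -- Python raises IndexError here (outside Pre_)
  else []

-- ===== PRECONDITION & SPEC =====
-- Pre_ excludes exactly the inputs on which A raises IndexError: 2-/3-row patterns with
-- some row shorter than the row count.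
def Pre_get_pattern_variations (pattern : String) : Prop :=
  let p3 := PySem.Chars.splitOn pattern.toList ['/']
  (p3.length = 2 → ∀ r ∈ p3, 2 ≤ r.length) ∧ (p3.length = 3 → ∀ r ∈ p3, 3 ≤ r.length)
instance (pattern : String) : Decidable (Pre_get_pattern_variations pattern) := by
  unfold Pre_get_pattern_variations; infer_instance

def pvWitness_get_pattern_variations : String := "ab/cd"

def Spec_get_pattern_variations (pattern : String) (out : List String) : Prop := out = get_pattern_variations_alt pattern
instance (pattern : String) (out : List String) : Decidable (Spec_get_pattern_variations pattern out) := by unfold Spec_get_pattern_variations; infer_instance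

-- ===== CLAIM (what is proved, stated in full; the proofs are below) =====
def Claim_equal_get_pattern_variations : Prop := ∀ (pattern : String), Dom_get_pattern_variations pattern → Pre_get_pattern_variations pattern → Spec_get_pattern_variations pattern (get_pattern_variations pattern)

-- ===== LEMMAS AND PROOFS =====

lemma pv_get1 {α : Type} (a b : α) (t : List α) :
    PySem.List.pyGet? (a::b::t) 1 = some b := by
  rw [show ((1:Int)) = ((1:Nat):Int) by norm_num, PySem.List.pyGet?_natCast]; simp

lemma pv_get2 {α : Type} (a b c : α) (t : List α) :
    PySem.List.pyGet? (a::b::c::t) 2 = some c := by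
  rw [show ((2:Int)) = ((2:Nat):Int) by norm_num, PySem.List.pyGet?_natCast]; simp

lemma pv_crop2 (a b c d : Char) (t0 t1 : List Char) :
    [a::b::t0, c::d::t1].mapM (fun r => (List.range 2).mapM (fun c => r[c]?)) =
      some [[a,b],[c,d]] := by
  simp [List.range_succ]

lemma pv_crop3 (a b c d e f g h i : Char) (t0 t1 t2 : List Char) :
    [a::b::c::t0, d::e::f::t1, g::h::i::t2].mapM
        (fun r => (List.range 3).mapM (fun c => r[c]?)) =
      some [[a,b,c],[d,e,f],[g,h,i]] := by
  simp [List.range_succ]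

lemma pv_core2 (a b c d : Char) :
    pvFourRotsB 2 [[a,b],[c,d]] ++ pvFourRotsB 2 (pvFlipB 2 [[a,b],[c,d]]) =
      [ PySem.Str.join "/" [String.ofList [a,b], String.ofList [c,d]],
        PySem.Str.join "/" [String.ofList [c,a], String.ofList [d,b]],
        PySem.Str.join "/" [String.ofList [d,c], String.ofList [b,a]],
        PySem.Str.join "/" [String.ofList [b,d], String.ofList [a,c]],
        PySem.Str.join "/" [String.ofList [b,a], String.ofList [d,c]],
        PySem.Str.join "/" [String.ofList [d,b], String.ofList [c,a]],
        PySem.Str.join "/" [String.ofList [c,d], String.ofList [a,b]],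
        PySem.Str.join "/" [String.ofList [a,c], String.ofList [b,d]] ] := by
  simp [pvFourRotsB, pvRotB, pvFlipB, List.range_succ,
        PySem.Str.join, PySem.Chars.join, List.intercalate]

lemma pv_core3 (a b c d e f g h i : Char) :
    pvFourRotsB 3 [[a,b,c],[d,e,f],[g,h,i]] ++
        pvFourRotsB 3 (pvFlipB 3 [[a,b,c],[d,e,f],[g,h,i]]) =
      [ PySem.Str.join "/" [String.ofList [a,b,c], String.ofList [d,e,f], String.ofList [g,h,i]],
        PySem.Str.join "/" [String.ofList [g,d,a], String.ofList [h,e,b], String.ofList [i,f,c]],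
        PySem.Str.join "/" [String.ofList [i,h,g], String.ofList [f,e,d], String.ofList [c,b,a]],
        PySem.Str.join "/" [String.ofList [c,f,i], String.ofList [b,e,h], String.ofList [a,d,g]],
        PySem.Str.join "/" [String.ofList [c,b,a], String.ofList [f,e,d], String.ofList [i,h,g]],
        PySem.Str.join "/" [String.ofList [i,f,c], String.ofList [h,e,b], String.ofList [g,d,a]],
        PySem.Str.join "/" [String.ofList [g,h,i], String.ofList [d,e,f], String.ofList [a,b,c]],
        PySem.Str.join "/" [String.ofList [a,d,g], String.ofList [b,e,h], String.ofList [c,f,i]] ] := by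
  simp [pvFourRotsB, pvRotB, pvFlipB, List.range_succ,
        PySem.Str.join, PySem.Chars.join, List.intercalate]

-- ===== VERDICT (by name: the statement is the Claim_ definition above) =====
theorem get_pattern_variations_spec : Claim_equal_get_pattern_variations := by
  intro pattern _ pre
  unfold Spec_get_pattern_variations
  unfold Pre_get_pattern_variations at pre
  unfold get_pattern_variations get_pattern_variations_alt
  obtain ⟨p2, p3'⟩ := pre
  generalize hrw : PySem.Chars.splitOn pattern.toList ['/'] = rows at *
  match rows, p2, p3' with
  | [], _, _ => simp [pvFlatten3d]
  | [r0], _, _ => simp [pvFlatten3d]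
  | [r0, r1], h2, _ =>
    have h0 : 2 ≤ r0.length := h2 rfl r0 (by simp)
    have h1 : 2 ≤ r1.length := h2 rfl r1 (by simp)
    rcases r0 with _ | ⟨a, _ | ⟨b, t0⟩⟩ <;> try (simp at h0)
    rcases r1 with _ | ⟨c, _ | ⟨d, t1⟩⟩ <;> try (simp at h1)
    simp only [List.map_cons, List.map_nil, List.length_cons, List.length_nil]
    rw [show (PySem.Str.pyGet? (String.ofList (a::b::t0)) 0) = some a by
          simp [PySem.Str.pyGet?, PySem.Chars.pyGet?],
        show (PySem.Str.pyGet? (String.ofList (a::b::t0)) 1) = some b by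
          simp [PySem.Str.pyGet?, PySem.Chars.pyGet?],
        show (PySem.Str.pyGet? (String.ofList (c::d::t1)) 0) = some c by
          simp [PySem.Str.pyGet?, PySem.Chars.pyGet?],
        show (PySem.Str.pyGet? (String.ofList (c::d::t1)) 1) = some d by
          simp [PySem.Str.pyGet?, PySem.Chars.pyGet?]]
    rw [if_pos (by norm_num), pv_crop2]
    simpa [pvFlatten3d] using (pv_core2 a b c d).symm
  | [r0, r1, r2], _, h3 =>
    have h0 : 3 ≤ r0.length := h3 rfl r0 (by simp)
    have h1 : 3 ≤ r1.length := h3 rfl r1 (by simp)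
    have h2 : 3 ≤ r2.length := h3 rfl r2 (by simp)
    rcases r0 with _ | ⟨a, _ | ⟨b, _ | ⟨c, t0⟩⟩⟩ <;> try (simp at h0)
    rcases r1 with _ | ⟨d, _ | ⟨e, _ | ⟨f, t1⟩⟩⟩ <;> try (simp at h1)
    rcases r2 with _ | ⟨g, _ | ⟨h, _ | ⟨i, t2⟩⟩⟩ <;> try (simp at h2)
    simp only [List.map_cons, List.map_nil, List.length_cons, List.length_nil]
    rw [show (PySem.Str.pyGet? (String.ofList (a::b::c::t0)) 0) = some a by
          simp [PySem.Str.pyGet?, PySem.Chars.pyGet?],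
        show (PySem.Str.pyGet? (String.ofList (a::b::c::t0)) 1) = some b by
          simp [PySem.Str.pyGet?, PySem.Chars.pyGet?, pv_get1],
        show (PySem.Str.pyGet? (String.ofList (a::b::c::t0)) 2) = some c by
          simp [PySem.Str.pyGet?, PySem.Chars.pyGet?, pv_get2],
        show (PySem.Str.pyGet? (String.ofList (d::e::f::t1)) 0) = some d by
          simp [PySem.Str.pyGet?, PySem.Chars.pyGet?],
        show (PySem.Str.pyGet? (String.ofList (d::e::f::t1)) 1) = some e by
          simp [PySem.Str.pyGet?, PySem.Chars.pyGet?, pv_get1],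
        show (PySem.Str.pyGet? (String.ofList (d::e::f::t1)) 2) = some f by
          simp [PySem.Str.pyGet?, PySem.Chars.pyGet?, pv_get2],
        show (PySem.Str.pyGet? (String.ofList (g::h::i::t2)) 0) = some g by
          simp [PySem.Str.pyGet?, PySem.Chars.pyGet?],
        show (PySem.Str.pyGet? (String.ofList (g::h::i::t2)) 1) = some h by
          simp [PySem.Str.pyGet?, PySem.Chars.pyGet?, pv_get1],
        show (PySem.Str.pyGet? (String.ofList (g::h::i::t2)) 2) = some i by
          simp [PySem.Str.pyGet?, PySem.Chars.pyGet?, pv_get2]]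
    rw [if_pos (by norm_num), pv_crop3]
    simpa [pvFlatten3d] using (pv_core3 a b c d e f g h i).symm
  | r0 :: r1 :: r2 :: r3 :: rest, _, _ =>
    simp [pvFlatten3d]
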